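-- pv_equiv track=rewrite | github.com/khakaa/Algorithm | 프로그래머스/lv1/131128. 숫자 짝꿍/숫자 짝꿍.py | solution
-- ===== SOURCE A (Python) =====
-- from collections import defaultdict
--
-- def solution(X, Y):
--     answer = ''
--
--     x_cnt = defaultdict(int)
--     y_cnt = defaultdict(int)
--     for x in X:
--         x_cnt[x] += 1
--     for y in Y:
--         y_cnt[y] += 1
--
--     for x in x_cnt:
--         if x in y_cnt:
--             answer += x * min(x_cnt[x], y_cnt[x])
--
--     if answer == '':
--         return '-1'
--
--     answer = sorted(answer, reverse=True)
--
--     if answer[0] == '0':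
--         return '0'
--
--     return "".join(answer)
-- ===== SOURCE B (Python) =====
-- def solution(X, Y):
--     cx = [0] * 128
--     cy = [0] * 128
--     for c in X:
--         cx[ord(c)] += 1
--     for c in Y:
--         cy[ord(c)] += 1
--     out = []
--     for code in range(127, -1, -1):
--         out.extend(chr(code) * min(cx[code], cy[code]))
--     if not out:
--         return '-1'
--     if out[0] == '0':
--         return '0'
--     return ''.join(out)
-- ===== Notes on version B (the rewrite author's own statement) =====
-- stated objective: alternative
-- what changed: replaces the dict-of-counts plus sorted(answer, reverse=True) with two 128-entry counting arrays and a single descending sweep over ASCII codes that emits the result already in order (counting sort, no comparison sort)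
import Mathlib
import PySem

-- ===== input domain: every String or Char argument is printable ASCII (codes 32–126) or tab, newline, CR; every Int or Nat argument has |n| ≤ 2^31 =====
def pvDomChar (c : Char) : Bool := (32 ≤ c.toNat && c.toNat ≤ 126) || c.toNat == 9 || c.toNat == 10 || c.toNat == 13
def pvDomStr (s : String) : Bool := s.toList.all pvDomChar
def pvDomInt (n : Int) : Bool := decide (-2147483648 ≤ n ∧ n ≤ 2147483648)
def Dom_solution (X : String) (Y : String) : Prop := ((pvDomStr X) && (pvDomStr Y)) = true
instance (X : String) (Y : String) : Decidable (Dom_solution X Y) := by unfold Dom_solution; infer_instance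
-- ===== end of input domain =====

-- B replaces A's dict counting + reverse sort by counting arrays and one descending
-- sweep over char codes (counting sort) — an alternative, sort-free algorithm.

-- ===== PORT A =====
def solution (X : String) (Y : String) : String :=
  let x_cnt : PySem.Dict Char Int :=
    X.toList.foldl (fun d x => d.modify x 0 (· + 1)) PySem.Dict.empty
  let y_cnt : PySem.Dict Char Int :=
    Y.toList.foldl (fun d y => d.modify y 0 (· + 1)) PySem.Dict.empty
  let answer : List Char := x_cnt.keys.foldl (fun acc x =>
      if y_cnt.contains x then
        acc ++ PySem.List.pyRepeat [x] (min (x_cnt.getD x 0) (y_cnt.getD x 0))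
      else acc) []
  if answer = [] then "-1"
  else
    let sortedAns := PySem.List.sorted answer (fun c => c) true
    if PySem.List.pyGetD sortedAns 0 ' ' = '0' then "0"
    else String.ofList sortedAns

-- ===== PORT B =====
-- array writes cx[ord(c)] += 1 are exact for code points < 128, i.e. on all of Dom
def solution_alt (X : String) (Y : String) : String :=
  let cx : List Int := X.toList.foldl
    (fun a c => PySem.List.pySetD a (c.toNat : Int) (PySem.List.pyGetD a (c.toNat : Int) 0 + 1))
    (List.replicate 128 (0 : Int))
  let cy : List Int := Y.toList.foldl
    (fun a c => PySem.List.pySetD a (c.toNat : Int) (PySem.List.pyGetD a (c.toNat : Int) 0 + 1))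
    (List.replicate 128 (0 : Int))
  let out : List Char := (PySem.List.pyRange 127 (-1) (-1)).foldl (fun acc code =>
      acc ++ PySem.List.pyRepeat [Char.ofNat code.toNat]
        (min (PySem.List.pyGetD cx code 0) (PySem.List.pyGetD cy code 0))) []
  if out = [] then "-1"
  else if PySem.List.pyGetD out 0 ' ' = '0' then "0"
  else String.ofList out

-- ===== PRECONDITION & SPEC =====
def Spec_solution (X : String) (Y : String) (out : String) : Prop := out = solution_alt X Y
instance (X : String) (Y : String) (out : String) : Decidable (Spec_solution X Y out) := by unfold Spec_solution; infer_instance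

-- ===== CLAIM (what is proved, stated in full; the proofs are below) =====
def Claim_equal_solution : Prop := ∀ (X : String) (Y : String), Dom_solution X Y → Spec_solution X Y (solution X Y)

-- ===== LEMMAS AND PROOFS =====

-- the common multiplicity of a char in X and Y
def mcnt (X Y : String) (c : Char) : Nat := min (X.toList.count c) (Y.toList.count c)

-- B's counting array
def cnt (s : String) : List Int :=
  s.toList.foldl
    (fun a c => PySem.List.pySetD a (c.toNat : Int) (PySem.List.pyGetD a (c.toNat : Int) 0 + 1))
    (List.replicate 128 (0 : Int))

-- A's pre-sort answer string, via Dict.counter (definitionally A's dict loops)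
def ansA (X Y : String) : List Char :=
  (PySem.Dict.counter X.toList).keys.foldl (fun acc x =>
      if (PySem.Dict.counter Y.toList).contains x then
        acc ++ PySem.List.pyRepeat [x]
          (min ((PySem.Dict.counter X.toList).getD x 0) ((PySem.Dict.counter Y.toList).getD x 0))
      else acc) []

-- B's output list
def outB (X Y : String) : List Char :=
  (PySem.List.pyRange 127 (-1) (-1)).foldl (fun acc code =>
      acc ++ PySem.List.pyRepeat [Char.ofNat code.toNat]
        (min (PySem.List.pyGetD (cnt X) code 0) (PySem.List.pyGetD (cnt Y) code 0))) []

-- the descending list of chars B sweeps over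
def ksB : List Char := (List.range 128).map (fun k => Char.ofNat (127 - k))

lemma solution_eq (X Y : String) :
    solution X Y =
      if ansA X Y = [] then "-1"
      else if PySem.List.pyGetD (PySem.List.sorted (ansA X Y) (fun c => c) true) 0 ' ' = '0' then "0"
      else String.ofList (PySem.List.sorted (ansA X Y) (fun c => c) true) := rfl

lemma solution_alt_eq (X Y : String) :
    solution_alt X Y =
      if outB X Y = [] then "-1"
      else if PySem.List.pyGetD (outB X Y) 0 ' ' = '0' then "0"
      else String.ofList (outB X Y) := rfl

lemma char_toNat_inj {a b : Char} (h : a.toNat = b.toNat) : a = b :=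
  Char.ext (UInt32.toNat_inj.mp h)

lemma char_toNat_ofNat {n : Nat} (h : n < 128) : (Char.ofNat n).toNat = n := by
  have hv : n.isValidChar := Or.inl (by omega)
  simp [Char.ofNat, hv]

lemma char_lt_iff (a b : Char) : a < b ↔ a.toNat < b.toNat := by
  rw [Char.lt_def]; exact UInt32.lt_iff_toNat_lt

lemma char_le_iff (a b : Char) : a ≤ b ↔ a.toNat ≤ b.toNat := by
  rw [Char.le_def]; exact UInt32.le_iff_toNat_le

-- the counting-array fold invariant
lemma cnt_fold_getD (l : List Char) (init : List Int) (hlen : init.length = 128)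
    (k : Nat) (hk : k < 128) :
    PySem.List.pyGetD
      (l.foldl (fun a c => PySem.List.pySetD a (c.toNat : Int) (PySem.List.pyGetD a (c.toNat : Int) 0 + 1)) init)
      (k : Int) 0
    = PySem.List.pyGetD init (k : Int) 0 + (l.count (Char.ofNat k) : Int) := by
  induction l generalizing init with
  | nil => simp
  | cons c l ih =>
    rw [List.foldl_cons, ih _ (by rw [PySem.List.pySetD_natCast]; simpa using hlen)]
    rw [PySem.List.pySetD_natCast]
    simp only [PySem.List.pyGetD_natCast]
    have hset : (init.set c.toNat (init.getD c.toNat 0 + 1)).getD k 0 =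
        if c.toNat = k then init.getD k 0 + 1 else init.getD k 0 := by
      simp only [List.getD_eq_getElem?_getD, List.getElem?_set]
      by_cases h : c.toNat = k
      · subst h; simp [hlen, hk]
      · simp [h]
    rw [hset, List.count_cons]
    by_cases h : c.toNat = k
    · have hc : (c == Char.ofNat k) = true := by
        rw [beq_iff_eq]; exact char_toNat_inj (by rw [h, char_toNat_ofNat hk])
      rw [if_pos h]
      simp only [hc, if_true]
      push_cast
      ring
    · have hc : (c == Char.ofNat k) = false := by
        apply beq_false_of_ne
        intro hcc
        exact h (by rw [hcc, char_toNat_ofNat hk])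
      rw [if_neg h]
      simp only [hc, Bool.false_eq_true, if_false]
      push_cast
      ring

lemma cnt_getD (s : String) (k : Nat) (hk : k < 128) :
    PySem.List.pyGetD (cnt s) (k : Int) 0 = (s.toList.count (Char.ofNat k) : Int) := by
  unfold cnt
  rw [cnt_fold_getD _ _ List.length_replicate k hk]
  rw [PySem.List.pyGetD_natCast, List.getD_eq_getElem?_getD, List.getElem?_replicate]
  simp [hk]

-- counting elements of a flatMap whose block at x contains only x's
lemma count_flatMap_diag (ks : List Char) (g : Char → List Char)
    (hg : ∀ x, ∀ y ∈ g x, y = x) (hnd : ks.Nodup) (c : Char) :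
    (ks.flatMap g).count c = if c ∈ ks then (g c).count c else 0 := by
  induction ks with
  | nil => simp
  | cons k ks ih =>
    rw [List.flatMap_cons, List.count_append, ih hnd.of_cons]
    by_cases h : c = k
    · subst h
      have hnot : c ∉ ks := (List.nodup_cons.mp hnd).1
      simp [hnot]
    · have h0 : (g k).count c = 0 := by
        rw [List.count_eq_zero]
        intro hmem
        exact h (hg k c hmem)
      simp [h0, h]

-- a flatMap of same-char blocks over a strictly descending char list is descending
lemma pairwise_flatMap_diag (ks : List Char) (g : Char → List Char)
    (hg : ∀ x, ∀ y ∈ g x, y = x) (h : ks.Pairwise (fun a b => b < a)) :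
    (ks.flatMap g).Pairwise (fun a b : Char => b ≤ a) := by
  induction ks with
  | nil => simp
  | cons k ks ih =>
    rw [List.flatMap_cons, List.pairwise_append]
    refine ⟨?_, ih h.of_cons, ?_⟩
    · apply List.Pairwise.imp_of_mem (l := g k) (R := fun a b => a = k ∧ b = k)
      · rintro a b _ _ ⟨ha, hb⟩; rw [ha, hb]
      · rw [List.pairwise_iff_forall_sublist]
        intro a b hs
        have hm := hs.subset
        exact ⟨hg k a (hm (by simp)), hg k b (hm (by simp))⟩
    · intro a ha b hb
      rw [List.mem_flatMap] at hb
      obtain ⟨x, hx, hbx⟩ := hb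
      have hax : a = k := hg k a ha
      have hbx' : b = x := hg x b hbx
      have := (List.pairwise_cons.mp h).1 x hx
      rw [hax, hbx']
      exact le_of_lt this

lemma count_ansA (X Y : String) (c : Char) : (ansA X Y).count c = mcnt X Y c := by
  unfold ansA
  rw [PySem.List.foldl_if_eq_foldl_filter
      (p := fun x => (PySem.Dict.counter Y.toList).contains x)
      (f := fun acc x => acc ++ PySem.List.pyRepeat [x]
        (min ((PySem.Dict.counter X.toList).getD x 0) ((PySem.Dict.counter Y.toList).getD x 0)))]
  rw [PySem.List.foldl_append_eq_flatMap, List.nil_append]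
  have hg : ∀ x : Char, ∀ y ∈ PySem.List.pyRepeat [x]
      (min ((PySem.Dict.counter X.toList).getD x 0) ((PySem.Dict.counter Y.toList).getD x 0)), y = x := by
    intro x y hy
    rw [PySem.List.pyRepeat_singleton] at hy
    exact (List.mem_replicate.mp hy).2
  have hnd : ((PySem.Dict.counter X.toList).keys.filter
      (fun x => (PySem.Dict.counter Y.toList).contains x)).Nodup := by
    apply List.Nodup.filter
    rw [PySem.Dict.keys_counter]
    exact PySem.Set.nodup_ofList _
  rw [count_flatMap_diag _ _ hg hnd c]
  simp only [List.mem_filter, PySem.Dict.keys_counter, PySem.Set.mem_ofList, PySem.Dict.contains_counter,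
    PySem.Dict.getD_counter, PySem.List.pyRepeat_singleton]
  by_cases hx : c ∈ X.toList
  · by_cases hy : c ∈ Y.toList
    · have hyc : Y.toList.contains c = true := by simpa using hy
      rw [if_pos ⟨hx, hyc⟩, List.count_replicate_self]
      unfold mcnt; omega
    · have h0 : Y.toList.count c = 0 := List.count_eq_zero.mpr hy
      rw [if_neg (fun h => hy (by simpa using h.2))]
      unfold mcnt; simp [h0]
  · have h0 : X.toList.count c = 0 := List.count_eq_zero.mpr hx
    rw [if_neg (by tauto)]
    unfold mcnt; simp [h0]

lemma outB_eq (X Y : String) :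
    outB X Y = ksB.flatMap (fun x => List.replicate (mcnt X Y x) x) := by
  unfold outB
  rw [PySem.List.foldl_append_eq_flatMap, List.nil_append, PySem.List.pyRange_neg_one]
  have h128 : ((127 : Int) - (-1)).toNat = 128 := by decide
  rw [h128]
  unfold ksB
  simp only [List.flatMap_map]
  rw [List.flatMap_def, List.flatMap_def]
  congr 1
  apply List.map_congr_left
  intro k hk
  have hk' : k < 128 := List.mem_range.mp hk
  have hcast : (127 : Int) - (k : Nat) = ((127 - k : Nat) : Int) := by omega
  rw [hcast]
  have hlt : 127 - k < 128 := by omega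
  rw [cnt_getD X _ hlt, cnt_getD Y _ hlt, PySem.List.pyRepeat_singleton, Int.toNat_natCast]
  have hmin : (min ((X.toList.count (Char.ofNat (127 - k)) : Nat) : Int)
      ((Y.toList.count (Char.ofNat (127 - k)) : Nat) : Int)).toNat
      = mcnt X Y (Char.ofNat (127 - k)) := by unfold mcnt; omega
  rw [hmin]

lemma mem_ksB (c : Char) : c ∈ ksB ↔ c.toNat < 128 := by
  unfold ksB
  rw [List.mem_map]
  constructor
  · rintro ⟨k, hk, rfl⟩
    have hk' : k < 128 := List.mem_range.mp hk
    rw [char_toNat_ofNat (by omega)]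
    omega
  · intro h
    refine ⟨127 - c.toNat, List.mem_range.mpr (by omega), ?_⟩
    apply char_toNat_inj
    rw [char_toNat_ofNat (by omega)]
    omega

lemma pairwise_gt_ksB : ksB.Pairwise (fun a b => b < a) := by
  unfold ksB
  rw [List.pairwise_map]
  apply List.Pairwise.imp_of_mem (R := fun a b => a < b ∧ a < 128 ∧ b < 128)
  · rintro a b _ _ ⟨h1, h2, h3⟩
    rw [char_lt_iff, char_toNat_ofNat (by omega), char_toNat_ofNat (by omega)]
    omega
  · rw [List.pairwise_iff_forall_sublist]
    intro a b hs
    have hm := hs.subset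
    have ha : a < 128 := List.mem_range.mp (hm (by simp))
    have hb : b < 128 := List.mem_range.mp (hm (by simp))
    refine ⟨?_, ha, hb⟩
    have := List.pairwise_iff_forall_sublist.mp (List.pairwise_lt_range (n := 128)) hs
    exact this
  
lemma count_outB (X Y : String) (c : Char) :
    (outB X Y).count c = if c.toNat < 128 then mcnt X Y c else 0 := by
  rw [outB_eq]
  have hnd : ksB.Nodup := pairwise_gt_ksB.imp fun h => ne_of_gt h
  rw [count_flatMap_diag _ _ (by intro x y hy; exact (List.mem_replicate.mp hy).2) hnd c]
  simp only [mem_ksB]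
  by_cases h : c.toNat < 128 <;> simp [h, List.count_replicate_self]

lemma dom_lt_128 {X Y : String} (h : Dom_solution X Y) : ∀ c ∈ X.toList, c.toNat < 128 := by
  unfold Dom_solution pvDomStr pvDomChar at h
  rw [Bool.and_eq_true] at h
  have hx := h.1
  rw [List.all_eq_true] at hx
  intro c hc
  have := hx c hc
  simp only [Bool.or_eq_true, Bool.and_eq_true, decide_eq_true_eq, beq_iff_eq] at this
  omega

lemma perm_ansA_outB {X Y : String} (h : Dom_solution X Y) :
    (ansA X Y).Perm (outB X Y) := by
  rw [List.perm_iff_count]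
  intro c
  rw [count_ansA, count_outB]
  by_cases hc : c.toNat < 128
  · simp [hc]
  · have hcx : c ∉ X.toList := fun hm => hc (dom_lt_128 h c hm)
    have h0 : X.toList.count c = 0 := List.count_eq_zero.mpr hcx
    simp [hc]
    unfold mcnt
    simp [h0]

lemma pairwise_outB (X Y : String) :
    (outB X Y).Pairwise (fun a b : Char => b ≤ a) := by
  rw [outB_eq]
  exact pairwise_flatMap_diag _ _ (by intro x y hy; exact (List.mem_replicate.mp hy).2)
    pairwise_gt_ksB

lemma sorted_ansA_eq_outB {X Y : String} (h : Dom_solution X Y) :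
    PySem.List.sorted (ansA X Y) (fun c => c) true = outB X Y := by
  apply PySem.List.eq_of_perm_of_pairwise_le_of_injective (fun c : Char => -(c.toNat : Int))
  · intro a b hab
    apply char_toNat_inj
    have h2 : -((a.toNat : Int)) = -((b.toNat : Int)) := hab
    omega
  · exact (PySem.List.sorted_perm _ _ _).trans (perm_ansA_outB h)
  · apply (PySem.List.sorted_pairwise_rev (ansA X Y) (fun c => c)).imp
    intro a b hba
    rw [char_le_iff] at hba
    omega
  · apply (pairwise_outB X Y).imp
    intro a b hba
    rw [char_le_iff] at hba
    omega

-- ===== VERDICT (by name: the statement is the Claim_ definition above) =====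
theorem solution_spec : Claim_equal_solution := by
  intro X Y hDom
  unfold Spec_solution
  rw [solution_eq, solution_alt_eq]
  have hEq := sorted_ansA_eq_outB hDom
  have hNil : ansA X Y = [] ↔ outB X Y = [] := by
    rw [← PySem.List.sorted_eq_nil_iff (ansA X Y) (fun c => c) true, hEq]
  by_cases hA : ansA X Y = []
  · have hB : outB X Y = [] := hNil.mp hA
    simp [hA, hB]
  · have hB : outB X Y ≠ [] := fun hb => hA (hNil.mpr hb)
    rw [if_neg hA, if_neg hB, hEq]
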